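-- pv_equiv track=rewrite | github.com/versenyi98/programming-contests | LeetCode/2514. Count Anagrams/solution.py | countAnagrams
-- ===== SOURCE A (Python) =====
-- import math
-- from collections import Counter
--
-- def countAnagrams(s: str) -> int:
--     res = 1
--     for word in s.split():
--         whole = math.factorial(len(word))
--         counter = Counter(list(word))
--         for key, item in counter.items():
--             whole //= math.factorial(item)
--         res *= whole
--     return res % 1000000007
-- ===== SOURCE B (Python) =====
-- def countAnagrams(s: str) -> int:
--     MOD = 1000000007
--     res = 1
--     for word in s.split():
--         whole = 1
--         cnt = {}
--         for j, ch in enumerate(word, 1):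
--             c = cnt.get(ch, 0) + 1
--             cnt[ch] = c
--             whole = whole * j // c
--         res = res * whole % MOD
--     return res
-- ===== Notes on version B (the rewrite author's own statement) =====
-- stated objective: alternative
-- what changed: Per word, B replaces the bignum factorial of the word length plus a Counter pass with factorial divisions by a single left-to-right scan that keeps a running count per character and updates the multinomial incrementally (whole = whole * j // cnt[ch]), taking the modulus as each word is folded in.
import Mathlib
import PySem

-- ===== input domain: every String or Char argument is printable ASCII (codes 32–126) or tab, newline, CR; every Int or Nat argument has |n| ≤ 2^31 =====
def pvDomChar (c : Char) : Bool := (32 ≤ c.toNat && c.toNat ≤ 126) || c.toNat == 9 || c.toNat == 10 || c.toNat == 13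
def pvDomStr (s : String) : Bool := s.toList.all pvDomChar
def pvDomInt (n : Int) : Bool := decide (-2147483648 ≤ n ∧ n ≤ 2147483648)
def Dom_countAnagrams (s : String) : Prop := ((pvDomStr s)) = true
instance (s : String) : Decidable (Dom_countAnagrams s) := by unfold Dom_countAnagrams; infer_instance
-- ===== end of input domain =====

-- B replaces per-word bignum factorials and a Counter pass by a single scan with an
-- incremental exact division (whole = whole * j // cnt[ch]) and folds the modulus into
-- the word loop; same return value, genuinely different algorithm (objective: alternative).

-- ===== PORT A =====
def countAnagrams (s : String) : Int :=
  let res : Int :=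
    (PySem.Str.split₀ s).foldl
      (fun res word =>
        let whole : Int := ((Nat.factorial word.toList.length : Nat) : Int)
        let counter := PySem.Dict.counter word.toList
        let whole :=
          counter.items.foldl
            (fun w (p : Char × Int) =>
              PySem.Int.floordiv w ((Nat.factorial p.2.toNat : Nat) : Int))
            whole
        res * whole)
      1
  PySem.Int.mod res 1000000007

-- ===== PORT B =====
def countAnagrams_alt (s : String) : Int :=
  (PySem.Str.split₀ s).foldl
    (fun res word =>
      let st :=
        (PySem.List.enumerate word.toList 1).foldl
          (fun (st : PySem.Dict Char Int × Int) (p : Int × Char) =>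
            let c := st.1.getD p.2 0 + 1
            (st.1.insert p.2 c, PySem.Int.floordiv (st.2 * p.1) c))
          (PySem.Dict.empty, 1)
      PySem.Int.mod (res * st.2) 1000000007)
    1

-- ===== PRECONDITION & SPEC =====
def Spec_countAnagrams (s : String) (out : Int) : Prop := out = countAnagrams_alt s
instance (s : String) (out : Int) : Decidable (Spec_countAnagrams s out) := by unfold Spec_countAnagrams; infer_instance

-- ===== CLAIM (what is proved, stated in full; the proofs are below) =====
def Claim_equal_countAnagrams : Prop := ∀ (s : String), Dom_countAnagrams s → Spec_countAnagrams s (countAnagrams s)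

-- ===== LEMMAS AND PROOFS =====

-- the factorial-product over the distinct characters of l (first-occurrence order)
def pvPF (l : List Char) : Nat :=
  ((PySem.List.dedup l).map (fun k => Nat.factorial (l.count k))).prod

-- the per-word value both programs compute: multinomial coefficient of the letter counts
def pvMult (l : List Char) : Nat := Nat.factorial l.length / pvPF l

lemma prod_map_update {α : Type} (l : List α) (f g : α → Nat) (a : α) (m : Nat)
    (hnd : l.Nodup) (ha : a ∈ l) (hga : g a = f a * m)
    (hother : ∀ x ∈ l, x ≠ a → g x = f x) :
    (l.map g).prod = (l.map f).prod * m := by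
  induction l with
  | nil => simp at ha
  | cons x xs ih =>
    simp only [List.nodup_cons] at hnd
    rcases List.mem_cons.mp ha with rfl | hmem
    · have htail : xs.map g = xs.map f := by
        apply List.map_congr_left
        intro y hy
        exact hother y (List.mem_cons_of_mem _ hy) (fun h => hnd.1 (h ▸ hy))
      simp [htail, hga]; ring
    · have hx : g x = f x := by
        apply hother x (List.mem_cons_self ..)
        intro h; exact hnd.1 (h ▸ hmem)
      have := ih hnd.2 hmem (fun y hy hya => hother y (List.mem_cons_of_mem _ hy) hya)
      simp [hx, this]; ring

lemma dedup_append_singleton (l : List Char) (ch : Char) :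
    PySem.List.dedup (l ++ [ch]) =
      if ch ∈ l then PySem.List.dedup l else PySem.List.dedup l ++ [ch] := by
  simp only [PySem.List.dedup_eq_ofList, PySem.Set.ofList_append]
  have h : (PySem.Set.ofList l).update [ch] = PySem.Set.add (PySem.Set.ofList l) ch := by
    simp [PySem.Set.update]
  rw [h]
  by_cases hm : ch ∈ l
  · rw [if_pos hm]
    simp [PySem.Set.add, hm]
  · rw [if_neg hm]
    simp [PySem.Set.add, hm]

lemma pvPF_append (l : List Char) (ch : Char) :
    pvPF (l ++ [ch]) = pvPF l * (l.count ch + 1) := by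
  unfold pvPF
  rw [dedup_append_singleton]
  by_cases hm : ch ∈ l
  · rw [if_pos hm]
    refine prod_map_update (PySem.List.dedup l) (fun k => Nat.factorial (l.count k))
      (fun k => Nat.factorial ((l ++ [ch]).count k)) ch (l.count ch + 1)
      (PySem.List.nodup_dedup l) ((PySem.List.mem_dedup l ch).mpr hm) ?_ ?_
    · simp [List.count_append, Nat.factorial_succ, Nat.mul_comm]
    · intro x _ hx
      simp [List.count_append, Ne.symm hx]
  · rw [if_neg hm]
    have hc : l.count ch = 0 := List.count_eq_zero.mpr hm
    have htail : (PySem.List.dedup l).map (fun k => Nat.factorial ((l ++ [ch]).count k))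
        = (PySem.List.dedup l).map (fun k => Nat.factorial (l.count k)) := by
      apply List.map_congr_left
      intro x hxd
      have hx : x ≠ ch := fun h => hm (h ▸ (PySem.List.mem_dedup l x).mp hxd)
      simp [List.count_append, Ne.symm hx]
    rw [List.map_append, List.prod_append, htail]
    simp [List.count_append, hc]

lemma prod_fact_dvd_fact_sum (vs : List Nat) :
    (vs.map Nat.factorial).prod ∣ Nat.factorial vs.sum := by
  induction vs with
  | nil => simp
  | cons v vs ih =>
    simp only [List.map_cons, List.prod_cons, List.sum_cons]
    calc Nat.factorial v * (vs.map Nat.factorial).prod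
        ∣ Nat.factorial v * Nat.factorial vs.sum := mul_dvd_mul_left _ ih
      _ ∣ Nat.factorial (v + vs.sum) := Nat.factorial_mul_factorial_dvd_factorial_add _ _

lemma pvPF_dvd (l : List Char) : pvPF l ∣ Nat.factorial l.length := by
  have hperm : List.Perm (PySem.List.dedup l) l.dedup := by
    refine (List.perm_ext_iff_of_nodup (PySem.List.nodup_dedup l) l.nodup_dedup).mpr ?_
    intro x
    rw [PySem.List.mem_dedup, List.mem_dedup]
  have hsum : ((PySem.List.dedup l).map (fun k => l.count k)).sum = l.length := by
    rw [(hperm.map (fun k => l.count k)).sum_eq]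
    exact List.sum_map_count_dedup_eq_length l
  have h := prod_fact_dvd_fact_sum ((PySem.List.dedup l).map (fun k => l.count k))
  rw [hsum, List.map_map] at h
  exact h

-- B's inner loop computes the multinomial coefficient
lemma bword (l : List Char) :
    (PySem.List.enumerate l 1).foldl
        (fun (st : PySem.Dict Char Int × Int) (p : Int × Char) =>
          let c := st.1.getD p.2 0 + 1
          (st.1.insert p.2 c, PySem.Int.floordiv (st.2 * p.1) c))
        (PySem.Dict.empty, 1)
      = (PySem.Dict.counter l, ((pvMult l : Nat) : Int)) := by
  induction l using List.reverseRecOn with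
  | nil => simp [pvMult, pvPF, PySem.List.enumerate, PySem.Dict.counter]
  | append_singleton l ch ih =>
    rw [PySem.List.enumerate_append, List.foldl_append, ih]
    simp only [PySem.List.enumerate_cons, PySem.List.enumerate_nil, List.foldl_cons,
      List.foldl_nil]
    have hfst : (PySem.Dict.counter l).insert ch ((PySem.Dict.counter l).getD ch 0 + 1)
        = PySem.Dict.counter (l ++ [ch]) := by
      have h := PySem.Dict.foldl_insert_getD_add_one_eq_counter (l ++ [ch])
      rw [List.foldl_append, PySem.Dict.foldl_insert_getD_add_one_eq_counter l] at h
      simpa using h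
    have hsnd : PySem.Int.floordiv (((pvMult l : Nat) : Int) * (1 + (l.length : Int)))
          ((PySem.Dict.counter l).getD ch 0 + 1)
        = ((pvMult (l ++ [ch]) : Nat) : Int) := by
      rw [PySem.Dict.getD_counter]
      have hcast1 : ((pvMult l : Nat) : Int) * (1 + (l.length : Int))
          = ((pvMult l * (1 + l.length) : Nat) : Int) := by push_cast; ring
      have hcast2 : ((l.count ch : Nat) : Int) + 1 = ((l.count ch + 1 : Nat) : Int) := by
        push_cast; ring
      rw [hcast1, hcast2, PySem.Int.floordiv_natCast]
      congr 1
      -- the Nat-level multinomial step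
      unfold pvMult
      rw [Nat.div_mul_right_comm (pvPF_dvd l) (1 + l.length), pvPF_append,
        Nat.div_div_eq_div_mul]
      congr 1
      · rw [List.length_append]
        simp [Nat.factorial_succ, Nat.add_comm, Nat.mul_comm]
    exact Prod.ext hfst hsnd

lemma afold (cnt : Char → Nat) (ks : List Char) (m : Nat) :
    ks.foldl (fun w k => PySem.Int.floordiv w ((Nat.factorial (cnt k) : Nat) : Int)) ((m : Nat) : Int)
      = ((m / (ks.map (fun k => Nat.factorial (cnt k))).prod : Nat) : Int) := by
  induction ks generalizing m with
  | nil => simp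
  | cons k ks ih =>
    simp only [List.foldl_cons, PySem.Int.floordiv_natCast, ih, List.map_cons, List.prod_cons]
    rw [Nat.div_div_eq_div_mul]

-- A's inner loop computes the multinomial coefficient
lemma aword (l : List Char) :
    (PySem.Dict.counter l).items.foldl
        (fun w (p : Char × Int) =>
          PySem.Int.floordiv w ((Nat.factorial p.2.toNat : Nat) : Int))
        ((Nat.factorial l.length : Nat) : Int)
      = ((pvMult l : Nat) : Int) := by
  rw [PySem.Dict.items_counter, List.foldl_map]
  simp only [Int.toNat_natCast]
  rw [afold (fun k => l.count k) (PySem.Set.ofList l) (Nat.factorial l.length)]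
  unfold pvMult pvPF
  rw [PySem.List.dedup_eq_ofList]

lemma fold_mod (M : Int) (hM : 0 < M) (f : String → Int) (ws : List String) (r : Int) :
    ws.foldl (fun res w => PySem.Int.mod (res * f w) M) (PySem.Int.mod r M)
      = PySem.Int.mod (ws.foldl (fun res w => res * f w) r) M := by
  induction ws generalizing r with
  | nil => rfl
  | cons w ws ih =>
    have key : PySem.Int.mod (PySem.Int.mod r M * f w) M = PySem.Int.mod (r * f w) M := by
      rw [PySem.Int.mod_eq_emod_of_pos hM, PySem.Int.mod_eq_emod_of_pos hM,
        PySem.Int.mod_eq_emod_of_pos hM]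
      conv_lhs => rw [Int.mul_emod, Int.emod_emod_of_dvd _ dvd_rfl, ← Int.mul_emod]
    simp only [List.foldl_cons]
    rw [key, ih (r * f w)]

lemma fold_mod1 (f : String → Int) (ws : List String) :
    ws.foldl (fun res w => PySem.Int.mod (res * f w) 1000000007) 1
      = PySem.Int.mod (ws.foldl (fun res w => res * f w) 1) 1000000007 := by
  have h := fold_mod 1000000007 (by norm_num) f ws 1
  rw [show PySem.Int.mod 1 1000000007 = 1 from by decide] at h
  exact h

-- ===== VERDICT (by name: the statement is the Claim_ definition above) =====
theorem countAnagrams_spec : Claim_equal_countAnagrams := by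
  intro s _
  unfold Spec_countAnagrams countAnagrams countAnagrams_alt
  simp only [bword, aword]
  exact (fold_mod1 (fun word => ((pvMult word.toList : Nat) : Int)) _).symm
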